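-- pv_equiv track=rewrite | github.com/ArvorCo/PNAD | scripts/pnad.py | _detect_weight_col
-- ===== SOURCE A (Python) =====
-- from typing import Dict, Iterable, List, Optional, Sequence, Tuple
--
-- def _detect_weight_col(headers: Sequence[str], requested: Optional[str]) -> Optional[str]:
--     if requested:
--         if requested not in headers:
--             raise ValueError(f"weight column not found: {requested}")
--         return requested
--
--     def base(name: str) -> str:
--         return name.split("__", 1)[0]
--
--     # Prefer calibrated weight (V1028), fallback to non-calibrated (V1027).
--     for target in ("V1028", "V1027"):
--         for h in headers:
--             if base(h) == target:
--                 return h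
--     return None
-- ===== SOURCE B (Python) =====
-- def _detect_weight_col(headers, requested):
--     if requested:
--         if requested not in headers:
--             raise ValueError(f"weight column not found: {requested}")
--         return requested
--     # One indexing pass: first occurrence of each base wins (setdefault),
--     # then constant-time lookups in priority order.
--     index = {}
--     for h in headers:
--         index.setdefault(h.split("__", 1)[0], h)
--     if "V1028" in index:
--         return index["V1028"]
--     return index.get("V1027")
-- ===== Notes on version B (the rewrite author's own statement) =====
-- stated objective: alternative
-- what changed: B builds a base->header first-occurrence dict in one pass over headers and resolves V1028/V1027 by two lookups, instead of A's per-target rescans of the header list.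
import Mathlib
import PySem

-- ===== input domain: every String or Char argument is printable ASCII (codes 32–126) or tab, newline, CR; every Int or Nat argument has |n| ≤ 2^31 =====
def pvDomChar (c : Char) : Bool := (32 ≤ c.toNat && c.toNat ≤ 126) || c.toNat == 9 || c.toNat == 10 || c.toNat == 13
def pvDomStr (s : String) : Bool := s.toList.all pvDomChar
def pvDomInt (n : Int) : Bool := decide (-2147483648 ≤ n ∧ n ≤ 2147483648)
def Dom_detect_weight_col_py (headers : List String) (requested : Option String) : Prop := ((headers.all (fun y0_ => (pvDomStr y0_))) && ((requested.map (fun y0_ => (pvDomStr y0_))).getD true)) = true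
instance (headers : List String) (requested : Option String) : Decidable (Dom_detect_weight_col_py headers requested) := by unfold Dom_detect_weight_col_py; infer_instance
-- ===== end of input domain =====

-- B replaces A's per-target rescans with one base->header indexing pass plus two lookups (alternative structure, same cost class).

-- ===== PORT A =====
-- base(name) = name.split("__", 1)[0]  (shared helper: both Pythons define the same base)
def pyBase (name : String) : String :=
  ((PySem.Str.splitMax? name "__" 1).getD []).headD ""

-- inner loop: for h in headers: if base(h) == target: return h
def pvScan (headers : List String) (target : String) : Option String :=
  headers.find? (fun h => pyBase h == target)

def detect_weight_col_py (headers : List String) (requested : Option String) : Option String :=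
  match requested with
  | some r =>
      if r ≠ "" then
        -- 'requested not in headers' raises ValueError: excluded by Pre_
        (if r ∈ headers then some r else none)
      else
        -- falsy requested (empty string): fall through to the scan
        ["V1028", "V1027"].findSome? (fun target => pvScan headers target)
  | none => ["V1028", "V1027"].findSome? (fun target => pvScan headers target)

-- ===== PORT B =====
-- index = {}; for h in headers: index.setdefault(base(h), h)
def pvIndex (headers : List String) : PySem.Dict String String :=
  headers.foldl
    (fun d h => if (d.get? (pyBase h)).isSome then d else d.insert (pyBase h) h)
    PySem.Dict.empty

def detect_weight_col_py_alt (headers : List String) (requested : Option String) : Option String :=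
  match requested with
  | some r =>
      if r ≠ "" then
        (if r ∈ headers then some r else none)
      else
        let idx := pvIndex headers
        match idx.get? "V1028" with
        | some h => some h
        | none => idx.get? "V1027"
  | none =>
      let idx := pvIndex headers
      match idx.get? "V1028" with
      | some h => some h
      | none => idx.get? "V1027"

-- ===== PRECONDITION & SPEC =====
-- Pre_ excludes exactly the inputs where A (and B alike) raises ValueError: a truthy requested not among headers.
def Pre_detect_weight_col_py (headers : List String) (requested : Option String) : Prop :=
  requested = none ∨ requested.getD "" = "" ∨ requested.getD "" ∈ headers

instance (headers : List String) (requested : Option String) : Decidable (Pre_detect_weight_col_py headers requested) := by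
  unfold Pre_detect_weight_col_py; infer_instance

def pvWitness_detect_weight_col_py : List String × Option String := (["V1027__a", "V1028__b"], none)

def Spec_detect_weight_col_py (headers : List String) (requested : Option String) (out : Option String) : Prop := out = detect_weight_col_py_alt headers requested
instance (headers : List String) (requested : Option String) (out : Option String) : Decidable (Spec_detect_weight_col_py headers requested out) := by unfold Spec_detect_weight_col_py; infer_instance

-- ===== CLAIM (what is proved, stated in full; the proofs are below) =====
def Claim_equal_detect_weight_col_py : Prop := ∀ (headers : List String) (requested : Option String), Dom_detect_weight_col_py headers requested → Pre_detect_weight_col_py headers requested → Spec_detect_weight_col_py headers requested (detect_weight_col_py headers requested)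

-- ===== LEMMAS AND PROOFS =====

-- The one-pass index looks up exactly what the per-target scan finds.
theorem pvIndex_get?_aux (t : String) (hs : List String) (d : PySem.Dict String String) :
    (hs.foldl (fun d h => if (d.get? (pyBase h)).isSome then d else d.insert (pyBase h) h) d).get? t
      = match d.get? t with
        | some v => some v
        | none => hs.find? (fun h => pyBase h == t) := by
  induction hs generalizing d with
  | nil =>
      simp only [List.foldl_nil, List.find?_nil]
      cases hdt : d.get? t <;> simp [hdt]
  | cons h hs ih =>
      simp only [List.foldl_cons, List.find?_cons]
      rw [ih]
      cases hdd : d.get? (pyBase h) with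
      | some v =>
          simp only [hdd, Option.isSome_some, if_true]
          by_cases hbt : pyBase h = t
          · subst hbt; rw [hdd]
          · have hb : (pyBase h == t) = false := by simp [hbt]
            rw [hb]
      | none =>
          simp only [hdd, Option.isSome_none, Bool.false_eq_true, if_false]
          rw [PySem.Dict.get?_insert]
          by_cases hbt : t = pyBase h
          · subst hbt; simp [hdd]
          · have hb : (pyBase h == t) = false := by
              simp only [beq_eq_false_iff_ne]; exact fun he => hbt he.symm
            rw [if_neg hbt, hb]

theorem pvIndex_get? (t : String) (hs : List String) :
    (pvIndex hs).get? t = hs.find? (fun h => pyBase h == t) := by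
  unfold pvIndex
  rw [pvIndex_get?_aux]
  rfl

theorem pvScan_eq (hs : List String) :
    (["V1028", "V1027"].findSome? (fun target => pvScan hs target))
      = (match (pvIndex hs).get? "V1028" with
         | some h => some h
         | none => (pvIndex hs).get? "V1027") := by
  simp only [List.findSome?, pvScan]
  rw [pvIndex_get? "V1028", pvIndex_get? "V1027"]
  cases hs.find? (fun h => pyBase h == "V1028") <;>
    cases hs.find? (fun h => pyBase h == "V1027") <;> simp

-- ===== VERDICT (by name: the statement is the Claim_ definition above) =====
theorem detect_weight_col_py_spec : Claim_equal_detect_weight_col_py := by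
  intro headers requested _ _
  unfold Spec_detect_weight_col_py detect_weight_col_py detect_weight_col_py_alt
  cases requested with
  | none => exact pvScan_eq headers
  | some r =>
      by_cases hr : r ≠ ""
      · simp [hr]
      · simp only [hr, if_false]
        exact pvScan_eq headers
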